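-- pv_equiv track=rewrite | github.com/Vladislav-NewJoined/Portfolio_Sozin_Vladislav | module26_Python_Data_Engineer/task2/simple_solution.py | process_products_and_categories_simple
-- ===== SOURCE A (Python) =====
-- def process_products_and_categories_simple(products_data, categories_data, product_category_data):
--     """
--     Простая версия без PySpark для тестирования логики.
--     Обрабатывает данные о продуктах и категориях и возвращает список кортежей
--     с парами "Имя продукта – Имя категории" и именами продуктов без категорий.
--     """
--     # Создаем словари для быстрого поиска
--     products_dict = {pid: name for pid, name in products_data}
--     categories_dict = {cid: name for cid, name in categories_data}
--
--     # Создаем словарь связей продукт -> список категорий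
--     product_categories = {}
--     for prod_id, cat_id in product_category_data:
--         if prod_id not in product_categories:
--             product_categories[prod_id] = []
--         product_categories[prod_id].append(cat_id)
--
--     results = []
--
--     # Обрабатываем все продукты
--     for prod_id, prod_name in products_data:
--         if prod_id in product_categories:
--             # Продукт имеет категории
--             for cat_id in product_categories[prod_id]:
--                 cat_name = categories_dict.get(cat_id)
--                 results.append((prod_name, cat_name))
--         else:
--             # Продукт без категории
--             results.append((prod_name, None))
--
--     return results
-- ===== SOURCE B (Python) =====
-- def process_products_and_categories_simple(products_data, categories_data, product_category_data):
--     """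
--     Simple version without PySpark.
--     For each product, scan the link table directly in its original order and
--     emit (product name, category name) pairs; products with no links get (name, None).
--     """
--     categories_dict = dict(categories_data)
--     results = []
--     for prod_id, prod_name in products_data:
--         matches = [cat_id for p, cat_id in product_category_data if p == prod_id]
--         if matches:
--             results.extend((prod_name, categories_dict.get(cat_id)) for cat_id in matches)
--         else:
--             results.append((prod_name, None))
--     return results
-- ===== Notes on version B (the rewrite author's own statement) =====
-- stated objective: alternative
-- what changed: B drops A's pre-built product->categories grouping dict (and the dead products_dict) and instead rescans product_category_data in order per product, keeping only the category-name dict.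
import Mathlib
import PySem

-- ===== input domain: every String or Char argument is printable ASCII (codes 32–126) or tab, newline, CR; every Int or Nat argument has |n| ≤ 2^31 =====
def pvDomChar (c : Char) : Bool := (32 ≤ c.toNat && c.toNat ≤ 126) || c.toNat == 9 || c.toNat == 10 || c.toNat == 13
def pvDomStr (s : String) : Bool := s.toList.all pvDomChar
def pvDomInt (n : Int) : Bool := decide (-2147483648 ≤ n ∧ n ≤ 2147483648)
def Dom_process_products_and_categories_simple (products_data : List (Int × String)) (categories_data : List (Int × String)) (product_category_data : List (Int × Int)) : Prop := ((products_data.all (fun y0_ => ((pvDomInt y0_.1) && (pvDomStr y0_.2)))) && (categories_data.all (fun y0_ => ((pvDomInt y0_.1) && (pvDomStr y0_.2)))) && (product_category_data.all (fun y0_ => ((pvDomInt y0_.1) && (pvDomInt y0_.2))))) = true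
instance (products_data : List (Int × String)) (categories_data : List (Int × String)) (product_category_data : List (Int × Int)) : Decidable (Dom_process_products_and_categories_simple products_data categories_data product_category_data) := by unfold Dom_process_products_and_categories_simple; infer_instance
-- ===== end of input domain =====

-- B replaces A's pre-built product->categories grouping dict (and the unused products_dict) with a direct in-order rescan of product_category_data per product; same return value, no speed claim.


-- ===== PORT A =====
def process_products_and_categories_simple (products_data : List (Int × String)) (categories_data : List (Int × String)) (product_category_data : List (Int × Int)) : List (String × Option String) :=
  let _products_dict : PySem.Dict Int String := PySem.Dict.ofList products_data
  let categories_dict : PySem.Dict Int String := PySem.Dict.ofList categories_data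
  let product_categories : PySem.Dict Int (List Int) :=
    product_category_data.foldl
      (fun d p =>
        (if d.contains p.1 then d else d.insert p.1 ([] : List Int)).modify p.1 [] (fun l => l ++ [p.2]))
      PySem.Dict.empty
  products_data.foldl
    (fun results q =>
      if product_categories.contains q.1 then
        (product_categories.getD q.1 []).foldl
          (fun results cat_id => results ++ [(q.2, categories_dict.get? cat_id)]) results
      else
        results ++ [(q.2, (none : Option String))])
    []

-- ===== PORT B =====
def process_products_and_categories_simple_alt (products_data : List (Int × String)) (categories_data : List (Int × String)) (product_category_data : List (Int × Int)) : List (String × Option String) :=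
  let categories_dict : PySem.Dict Int String := PySem.Dict.ofList categories_data
  products_data.foldl
    (fun results q =>
      let ms := (product_category_data.filter (fun p => p.1 == q.1)).map (·.2)
      if ms = [] then results ++ [(q.2, (none : Option String))]
      else results ++ ms.map (fun cat_id => (q.2, categories_dict.get? cat_id)))
    []

-- ===== PRECONDITION & SPEC =====
def Spec_process_products_and_categories_simple (products_data : List (Int × String)) (categories_data : List (Int × String)) (product_category_data : List (Int × Int)) (out : List (String × Option String)) : Prop := out = process_products_and_categories_simple_alt products_data categories_data product_category_data
instance (products_data : List (Int × String)) (categories_data : List (Int × String)) (product_category_data : List (Int × Int)) (out : List (String × Option String)) : Decidable (Spec_process_products_and_categories_simple products_data categories_data product_category_data out) := by unfold Spec_process_products_and_categories_simple; infer_instance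

-- ===== CLAIM (what is proved, stated in full; the proofs are below) =====
def Claim_equal_process_products_and_categories_simple : Prop := ∀ (products_data : List (Int × String)) (categories_data : List (Int × String)) (product_category_data : List (Int × Int)), Dom_process_products_and_categories_simple products_data categories_data product_category_data → Spec_process_products_and_categories_simple products_data categories_data product_category_data (process_products_and_categories_simple products_data categories_data product_category_data)

-- ===== LEMMAS AND PROOFS =====

-- A's grouping-loop step (conditional insert of [] then append) grows each key's group list.
lemma grp_getD (l : List (Int × Int)) (d : PySem.Dict Int (List Int)) (c : Int) :
    (l.foldl (fun d p => (if d.contains p.1 then d else d.insert p.1 ([] : List Int)).modify p.1 [] (fun l => l ++ [p.2])) d).getD c []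
      = d.getD c [] ++ (l.filter (fun p => p.1 == c)).map (·.2) := by
  induction l generalizing d with
  | nil => simp
  | cons p l ih =>
    simp only [List.foldl_cons, List.filter_cons]
    rw [ih]
    have hd : ∀ c, ((if d.contains p.1 then d else d.insert p.1 ([] : List Int)).modify p.1 [] (fun l => l ++ [p.2])).getD c []
        = if c = p.1 then d.getD p.1 [] ++ [p.2] else d.getD c [] := by
      intro c
      by_cases h : d.contains p.1 = true
      · rw [if_pos h, PySem.Dict.getD_modify]
      · rw [if_neg h, PySem.Dict.getD_modify, PySem.Dict.getD_insert, PySem.Dict.getD_insert]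
        have h0 : d.getD p.1 [] = [] :=
          PySem.Dict.getD_of_not_contains d [] (by simpa using h)
        by_cases hc : c = p.1 <;> simp [hc, h0]
    rw [hd c]
    by_cases hc : c = p.1
    · subst hc; simp
    · have h2 : (p.1 == c) = false := by simpa using Ne.symm hc
      rw [if_neg hc, h2]
      simp

lemma grp_contains (l : List (Int × Int)) (d : PySem.Dict Int (List Int)) (c : Int) :
    (l.foldl (fun d p => (if d.contains p.1 then d else d.insert p.1 ([] : List Int)).modify p.1 [] (fun l => l ++ [p.2])) d).contains c
      = (d.contains c || l.any (fun p => p.1 == c)) := by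
  induction l generalizing d with
  | nil => simp
  | cons p l ih =>
    simp only [List.foldl_cons, List.any_cons]
    rw [ih]
    have hd : ((if d.contains p.1 then d else d.insert p.1 ([] : List Int)).modify p.1 [] (fun l => l ++ [p.2])).contains c
        = (c == p.1 || d.contains c) := by
      by_cases h : d.contains p.1 = true
      · rw [if_pos h, PySem.Dict.contains_modify]
      · rw [if_neg h, PySem.Dict.contains_modify, PySem.Dict.contains_insert]
        by_cases hc : c = p.1 <;> simp [hc]
    rw [hd]
    by_cases hc : c = p.1
    · subst hc; simp
    · have h1 : (c == p.1) = false := by simpa using hc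
      have h2 : (p.1 == c) = false := by simpa using Ne.symm hc
      rw [h1, h2]
      simp

-- ===== VERDICT (by name: the statement is the Claim_ definition above) =====
theorem process_products_and_categories_simple_spec : Claim_equal_process_products_and_categories_simple := by
  intro products_data categories_data product_category_data _
  unfold Spec_process_products_and_categories_simple
  unfold process_products_and_categories_simple process_products_and_categories_simple_alt
  apply PySem.List.foldl_congr_mem
  intro results q _
  have hc := grp_contains product_category_data PySem.Dict.empty q.1
  have hg := grp_getD product_category_data PySem.Dict.empty q.1
  simp only [PySem.Dict.contains_empty, Bool.false_or, PySem.Dict.getD_empty,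
    List.nil_append] at hc hg
  rw [hc, hg, PySem.List.foldl_append_singleton_eq_map]
  by_cases h : product_category_data.any (fun p => p.1 == q.1) = true
  · have hne : ((product_category_data.filter (fun p => p.1 == q.1)).map (·.2)) ≠ [] := by
      simp only [ne_eq, List.map_eq_nil_iff, List.filter_eq_nil_iff]
      intro hnil
      rcases List.any_eq_true.mp h with ⟨p, hp, hpq⟩
      exact absurd hpq (hnil p hp)
    simp [h, hne, List.map_map]
  · have hnil : ((product_category_data.filter (fun p => p.1 == q.1)).map (·.2)) = [] := by
      have h' := eq_false_of_ne_true h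
      rw [List.filter_eq_nil_iff.mpr (List.any_eq_false.mp h'), List.map_nil]
    simp [h, hnil]
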